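-- pv_equiv track=rewrite | github.com/algoritmiaUS/ada-byron | I/I.py | calcular_ARE
-- ===== SOURCE A (Python) =====
-- def calcular_ARE(ventas):
--     n = len(ventas)
--     are = [1] * n
--     stack = []
--
--     # Recorremos cada día
--     for i in range(n):
--
--         while stack and ventas[stack[-1]] <= ventas[i]:
--             stack.pop()  # Sacamos el último elemento de la pila
--
--         are[i] = i - stack[-1] if stack else i + 1
--
--         stack.append(i)
--
--     return are
-- ===== SOURCE B (Python) =====
-- def calcular_ARE(ventas):
--     n = len(ventas)
--     are = [1] * n
--     for i in range(n):
--         # jump backwards over blocks of smaller-or-equal elements using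
--         # the spans already computed, instead of keeping a stack
--         while i - are[i] >= 0 and ventas[i - are[i]] <= ventas[i]:
--             are[i] += are[i - are[i]]
--     return are
-- ===== Notes on version B (the rewrite author's own statement) =====
-- stated objective: alternative
-- what changed: Replaces A's monotone index stack with a stack-free span-jump scan: are[i] starts at 1 and repeatedly jumps backwards by the already-computed span are[i - are[i]], skipping whole blocks of smaller-or-equal elements instead of pushing/popping indices.
import Mathlib
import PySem

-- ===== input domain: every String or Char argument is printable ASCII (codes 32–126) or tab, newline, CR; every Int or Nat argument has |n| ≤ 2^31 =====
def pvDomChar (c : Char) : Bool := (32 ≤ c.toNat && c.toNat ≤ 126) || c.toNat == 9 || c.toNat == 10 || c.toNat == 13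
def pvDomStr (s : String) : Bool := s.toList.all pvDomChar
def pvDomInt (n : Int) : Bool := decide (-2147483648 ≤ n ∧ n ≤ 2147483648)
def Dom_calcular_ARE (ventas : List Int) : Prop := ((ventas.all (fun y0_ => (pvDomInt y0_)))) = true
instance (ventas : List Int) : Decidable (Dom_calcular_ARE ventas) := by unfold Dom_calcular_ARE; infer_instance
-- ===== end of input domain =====

-- B replaces A's monotone stack by a span-jump scan (are[i] += are[i - are[i]]) that
-- navigates with the span array itself: an alternative algorithm of the same cost.

-- ===== PORT A =====
-- while stack and ventas[stack[-1]] <= ventas[i]: stack.pop()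
-- (stack top is the list head here; all Python index accesses are provably in range,
--  so `getD _ 0` is exact for them)
def popW (v : List Int) (x : Int) : List Nat → List Nat
  | [] => []
  | j :: s => if v.getD j 0 ≤ x then popW v x s else j :: s

-- one iteration of A's `for i in range(n)` body over the state (are, stack)
def stepA (v : List Int) (st : List Int × List Nat) (i : Nat) : List Int × List Nat :=
  let stack := popW v (v.getD i 0) st.2
  let val : Int := match stack with
    | [] => (i : Int) + 1                    -- are[i] = i + 1
    | j :: _ => (i : Int) - (j : Int)        -- are[i] = i - stack[-1]
  (st.1.set i val, i :: stack)

def calcular_ARE (ventas : List Int) : List Int :=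
  let n := ventas.length
  ((List.range n).foldl (stepA ventas) (List.replicate n 1, [])).1

-- ===== PORT B =====
-- B's inner `while i - are[i] >= 0 and ventas[i - are[i]] <= ventas[i]: are[i] += are[i - are[i]]`;
-- `s` is the current are[i]; fuel only makes the recursion structural (i+1 always suffices)
def jump (v are : List Int) (i : Nat) : Nat → Int → Int
  | 0, s => s
  | fuel + 1, s =>
    if 0 ≤ (i : Int) - s ∧ v.getD ((i : Int) - s).toNat 0 ≤ v.getD i 0 then
      jump v are i fuel (s + are.getD ((i : Int) - s).toNat 0)
    else s

def calcular_ARE_alt (ventas : List Int) : List Int :=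
  let n := ventas.length
  (List.range n).foldl (fun are i => are.set i (jump ventas are i (i + 1) 1)) (List.replicate n 1)

-- ===== PRECONDITION & SPEC =====
def Spec_calcular_ARE (ventas : List Int) (out : List Int) : Prop := out = calcular_ARE_alt ventas
instance (ventas : List Int) (out : List Int) : Decidable (Spec_calcular_ARE ventas out) := by unfold Spec_calcular_ARE; infer_instance

-- ===== CLAIM (what is proved, stated in full; the proofs are below) =====
def Claim_equal_calcular_ARE : Prop := ∀ (ventas : List Int), Dom_calcular_ARE ventas → Spec_calcular_ARE ventas (calcular_ARE ventas)

-- ===== LEMMAS AND PROOFS =====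

-- index of the previous strictly greater element among positions < i (scanning downwards)
def pg (v : List Int) (x : Int) : Nat → Option Nat
  | 0 => none
  | m + 1 => if x < v.getD m 0 then some m else pg v x m

-- the span value both programs compute at position j
def g (v : List Int) (j : Nat) : Int :=
  match pg v (v.getD j 0) j with
  | none => (j : Int) + 1
  | some m => (j : Int) - (m : Int)

-- A's stack after processing positions 0..i-1
def stackOf (v : List Int) : Nat → List Nat
  | 0 => []
  | i + 1 => i :: popW v (v.getD i 0) (stackOf v i)

-- the are array after processing positions 0..i-1 (shared shape of both folds)
def mapIf (v : List Int) (n i : Nat) : List Int :=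
  (List.range n).map (fun j => if j < i then g v j else 1)

theorem popW_popW (v : List Int) (x y : Int) (hyx : y ≤ x) :
    ∀ s : List Nat, popW v x (popW v y s) = popW v x s := by
  intro s
  induction s with
  | nil => rfl
  | cons j t ih =>
    by_cases h : v.getD j 0 ≤ y
    · have hx : v.getD j 0 ≤ x := le_trans h hyx
      rw [show popW v y (j :: t) = popW v y t by simp only [popW]; rw [if_pos h], ih,
        show popW v x (j :: t) = popW v x t by simp only [popW]; rw [if_pos hx]]
    · rw [show popW v y (j :: t) = j :: t by simp only [popW]; rw [if_neg h]]

theorem head_popW_stackOf (v : List Int) : ∀ i x, (popW v x (stackOf v i)).head? = pg v x i := by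
  intro i
  induction i with
  | zero => intro x; rfl
  | succ i ih =>
    intro x
    show (popW v x (i :: popW v (v.getD i 0) (stackOf v i))).head? = pg v x (i + 1)
    by_cases h : v.getD i 0 ≤ x
    · rw [show popW v x (i :: popW v (v.getD i 0) (stackOf v i))
            = popW v x (popW v (v.getD i 0) (stackOf v i)) by simp only [popW]; rw [if_pos h],
        popW_popW v x (v.getD i 0) h, ih x]
      simp only [pg]; rw [if_neg (not_lt.mpr h)]
    · rw [show popW v x (i :: popW v (v.getD i 0) (stackOf v i))
            = i :: popW v (v.getD i 0) (stackOf v i) by simp only [popW]; rw [if_neg h]]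
      simp only [pg, List.head?_cons]; rw [if_pos (lt_of_not_ge h)]

theorem pg_none_all (v : List Int) (x : Int) :
    ∀ i, pg v x i = none → ∀ k < i, v.getD k 0 ≤ x := by
  intro i
  induction i with
  | zero => intro _ k hk; omega
  | succ i ih =>
    intro h k hk
    unfold pg at h
    split at h
    · exact absurd h (by simp)
    · rcases Nat.lt_succ_iff_lt_or_eq.mp hk with hk' | rfl
      · exact ih h k hk'
      · omega

theorem pg_some_facts (v : List Int) (x : Int) :
    ∀ i m, pg v x i = some m →
      m < i ∧ x < v.getD m 0 ∧ ∀ k, m < k → k < i → v.getD k 0 ≤ x := by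
  intro i
  induction i with
  | zero => intro m h; exact absurd h (by simp [pg])
  | succ i ih =>
    intro m h
    unfold pg at h
    split at h
    · rename_i hlt
      obtain rfl : i = m := by simpa using h
      exact ⟨by omega, hlt, fun k hk1 hk2 => by omega⟩
    · rename_i hge
      obtain ⟨h1, h2, h3⟩ := ih m h
      refine ⟨by omega, h2, fun k hk1 hk2 => ?_⟩
      rcases Nat.lt_succ_iff_lt_or_eq.mp hk2 with hk' | rfl
      · exact h3 k hk1 hk'
      · exact not_lt.mp hge

theorem pg_intro_none (v : List Int) (x : Int) :
    ∀ i, (∀ k < i, v.getD k 0 ≤ x) → pg v x i = none := by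
  intro i
  induction i with
  | zero => intro _; rfl
  | succ i ih =>
    intro h
    unfold pg
    rw [if_neg (not_lt.mpr (h i (by omega)))]
    exact ih fun k hk => h k (by omega)

theorem pg_intro_some (v : List Int) (x : Int) :
    ∀ i m, m < i → x < v.getD m 0 → (∀ k, m < k → k < i → v.getD k 0 ≤ x) →
      pg v x i = some m := by
  intro i
  induction i with
  | zero => intro m h; omega
  | succ i ih =>
    intro m hm hx hall
    by_cases hmi : m = i
    · subst hmi; unfold pg; rw [if_pos hx]
    · unfold pg
      rw [if_neg (not_lt.mpr (hall i (by omega) (by omega)))]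
      exact ih m (by omega) hx fun k hk1 hk2 => hall k hk1 (by omega)

theorem jump_eq (v are : List Int) (i : Nat)
    (hare : ∀ m < i, are.getD m 0 = g v m) :
    ∀ (fuel : Nat) (s : Int), 1 ≤ s → s ≤ (i : Int) + 1 →
      (∀ j : Nat, (i : Int) - s < (j : Int) → j < i → v.getD j 0 ≤ v.getD i 0) →
      (i : Int) + 2 - s ≤ fuel →
      jump v are i fuel s = g v i := by
  intro fuel
  induction fuel with
  | zero => intro s h1 h2 _ hf; exfalso; simp at hf; omega
  | succ fuel ih =>
    intro s h1 h2 hinv hf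
    unfold jump
    by_cases hc : 0 ≤ (i : Int) - s ∧ v.getD ((i : Int) - s).toNat 0 ≤ v.getD i 0
    · rw [if_pos hc]
      obtain ⟨hge, hle⟩ := hc
      set m : Nat := ((i : Int) - s).toNat with hm
      have hmi : (m : Int) = (i : Int) - s := Int.toNat_of_nonneg hge
      have hmlt : m < i := by omega
      rw [hare m hmlt]
      -- new accumulator s' = s + g v m
      cases hpg : pg v (v.getD m 0) m with
      | none =>
        have hgm : g v m = (m : Int) + 1 := by unfold g; rw [hpg]
        have hall := pg_none_all v (v.getD m 0) m hpg
        rw [hgm]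
        refine ih (s + ((m : Int) + 1)) (by omega) (by omega) ?_ (by omega)
        intro j hj1 hj2
        rcases lt_trichotomy (j : Int) (m : Int) with h | h | h
        · exact le_trans (hall j (by omega)) hle
        · have : j = m := by omega
          subst this; exact hle
        · exact hinv j (by omega) hj2
      | some j' =>
        have hgm : g v m = (m : Int) - (j' : Int) := by unfold g; rw [hpg]
        obtain ⟨hj'm, hj'gt, hj'all⟩ := pg_some_facts v (v.getD m 0) m j' hpg
        rw [hgm]
        refine ih (s + ((m : Int) - (j' : Int))) (by omega) (by omega) ?_ (by omega)
        intro j hj1 hj2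
        rcases lt_trichotomy (j : Int) (m : Int) with h | h | h
        · exact le_trans (hj'all j (by omega) (by omega)) hle
        · have : j = m := by omega
          subst this; exact hle
        · exact hinv j (by omega) hj2
    · rw [if_neg hc]
      by_cases hge : 0 ≤ (i : Int) - s
      · -- stopped because ventas[i-s] > ventas[i]
        set m : Nat := ((i : Int) - s).toNat with hm
        have hmi : (m : Int) = (i : Int) - s := Int.toNat_of_nonneg hge
        have hgt := lt_of_not_ge (not_and.mp hc hge)
        have : pg v (v.getD i 0) i = some m :=
          pg_intro_some v _ i m (by omega) hgt
            (fun k hk1 hk2 => hinv k (by omega) hk2)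
        unfold g; rw [this]
        show s = (i : Int) - (m : Int)
        omega
      · -- s = i + 1, no previous greater element
        have hs : s = (i : Int) + 1 := by omega
        have : pg v (v.getD i 0) i = none :=
          pg_intro_none v _ i (fun k hk => hinv k (by omega) hk)
        unfold g; rw [this]
        show s = (i : Int) + 1
        omega

theorem mapIf_zero (v : List Int) (n : Nat) : mapIf v n 0 = List.replicate n 1 := by
  unfold mapIf
  simp

theorem mapIf_getD (v : List Int) (n i m : Nat) (hm : m < n) :
    (mapIf v n i).getD m 0 = if m < i then g v m else 1 := by
  unfold mapIf
  rw [List.getD_eq_getElem _ _ (by simpa using hm)]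
  simp

theorem mapIf_set (v : List Int) (n i : Nat) (_hi : i < n) :
    (mapIf v n i).set i (g v i) = mapIf v n (i + 1) := by
  apply List.ext_getElem
  · simp [mapIf]
  · intro k h1 h2
    have hk : k < n := by simpa [mapIf] using h2
    rw [List.getElem_set]
    by_cases hki : i = k
    · subst hki; simp [mapIf]
    · simp only [if_neg hki, mapIf, List.getElem_map, List.getElem_range]
      have : k < i ↔ k < i + 1 := by omega
      simp [this]

-- A's fold invariant
theorem foldA_inv (v : List Int) :
    ∀ i, i ≤ v.length →
      (List.range i).foldl (stepA v) (List.replicate v.length 1, []) =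
        (mapIf v v.length i, stackOf v i) := by
  intro i
  induction i with
  | zero => intro _; simp [mapIf_zero, stackOf]
  | succ i ih =>
    intro hi
    rw [List.range_succ, List.foldl_append, ih (by omega)]
    show stepA v (mapIf v v.length i, stackOf v i) i = _
    unfold stepA
    have hval :
        (match popW v (v.getD i 0) (stackOf v i) with
          | [] => (i : Int) + 1
          | j :: _ => (i : Int) - (j : Int)) = g v i := by
      have hh := head_popW_stackOf v i (v.getD i 0)
      cases hst : popW v (v.getD i 0) (stackOf v i) with
      | nil =>
        rw [hst] at hh
        unfold g; rw [← hh]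
        rfl
      | cons j t =>
        rw [hst] at hh
        unfold g; rw [← hh]
        rfl
    simp only [hval]
    rw [mapIf_set v _ i (by omega)]
    rfl

-- B's fold invariant
theorem foldB_inv (v : List Int) :
    ∀ i, i ≤ v.length →
      (List.range i).foldl (fun are k => are.set k (jump v are k (k + 1) 1)) (List.replicate v.length 1) =
        mapIf v v.length i := by
  intro i
  induction i with
  | zero => intro _; simp [mapIf_zero]
  | succ i ih =>
    intro hi
    rw [List.range_succ, List.foldl_append, ih (by omega)]
    show (mapIf v v.length i).set i (jump v (mapIf v v.length i) i (i + 1) 1) = _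
    have hj : jump v (mapIf v v.length i) i (i + 1) 1 = g v i := by
      apply jump_eq
      · intro m hm
        rw [mapIf_getD v _ i m (by omega)]
        simp [hm]
      · omega
      · omega
      · intro j hj1 hj2; omega
      · omega
    rw [hj, mapIf_set v _ i (by omega)]

-- ===== VERDICT (by name: the statement is the Claim_ definition above) =====
theorem calcular_ARE_spec : Claim_equal_calcular_ARE := by
  intro v _
  show calcular_ARE v = calcular_ARE_alt v
  show ((List.range v.length).foldl (stepA v) (List.replicate v.length 1, [])).1
      = (List.range v.length).foldl (fun are i => are.set i (jump v are i (i + 1) 1))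
          (List.replicate v.length 1)
  rw [foldA_inv v v.length (le_refl _), foldB_inv v v.length (le_refl _)]
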